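-- pv_equiv track=rewrite | github.com/jrh-dev/AdventOfCode2021 | python/day_10.py | auto_score
-- ===== SOURCE A (Python) =====
-- def auto_score(x):
--
--     score = 0
--
--     lookup = {
--         ")": 1,
--         "]": 2,
--         "}": 3,
--         ">": 4
--     }
--
--     x = [lookup[i] for i in x]
--
--     for ii in x:
--         score = score * 5
--         score += ii
--
--     return score
-- ===== SOURCE B (Python) =====
-- def auto_score(x):
--     lookup = {
--         ")": 1,
--         "]": 2,
--         "}": 3,
--         ">": 4
--     }
--     total = 0
--     place = 1
--     for c in reversed(x):
--         total += lookup[c] * place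
--         place *= 5
--     return total
-- ===== Notes on version B (the rewrite author's own statement) =====
-- stated objective: alternative
-- what changed: Replaces A's mapping pass plus forward Horner accumulation (score = score*5 + value) with a single back-to-front pass over reversed(x) that maintains an explicit place-value accumulator (place *= 5) and sums lookup[c]*place.
import Mathlib
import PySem

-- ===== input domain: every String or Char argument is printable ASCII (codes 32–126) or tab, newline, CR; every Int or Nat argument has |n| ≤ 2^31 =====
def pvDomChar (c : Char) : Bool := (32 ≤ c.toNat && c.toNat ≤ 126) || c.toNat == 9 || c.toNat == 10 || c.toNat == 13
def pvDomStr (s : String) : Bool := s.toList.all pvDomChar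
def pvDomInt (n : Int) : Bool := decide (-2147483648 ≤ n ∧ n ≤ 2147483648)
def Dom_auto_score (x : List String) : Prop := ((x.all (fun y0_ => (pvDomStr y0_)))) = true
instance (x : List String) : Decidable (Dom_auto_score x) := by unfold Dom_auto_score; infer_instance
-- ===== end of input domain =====

-- ===== PORT A =====
-- B replaces A's mapping pass + forward Horner loop with a single back-to-front pass
-- keeping an explicit place-value accumulator (alternative decomposition, same cost).
-- A's lookup dict; lookup[i] raises KeyError on other strings: get? = none there, excluded by Pre_.
def pvLookupA (s : String) : Option Int :=
  (PySem.Dict.ofList [(")", (1 : Int)), ("]", 2), ("}", 3), (">", 4)]).get? s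

-- A: x = [lookup[i] for i in x]; then for ii in x: score = score*5; score += ii
def auto_score (x : List String) : Int :=
  match x.mapM pvLookupA with
  | some vs => vs.foldl (fun score ii => score * 5 + ii) 0
  | none => 0   -- unreachable under Pre_auto_score (KeyError in Python)

-- ===== PORT B =====
def pvLookupB (s : String) : Option Int :=
  (PySem.Dict.ofList [(")", (1 : Int)), ("]", 2), ("}", 3), (">", 4)]).get? s

-- One loop step of B: state (total, place); none once a lookup fails (KeyError in Python).
def pvStepB (st : Option (Int × Int)) (c : String) : Option (Int × Int) :=
  match st, pvLookupB c with
  | some (total, place), some v => some (total + v * place, place * 5)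
  | _, _ => none

-- B: total = 0; place = 1; for c in reversed(x): total += lookup[c]*place; place *= 5
def auto_score_alt (x : List String) : Int :=
  match x.reverse.foldl pvStepB (some (0, 1)) with
  | some (total, _) => total
  | none => 0   -- unreachable under Pre_auto_score (KeyError in Python)

-- ===== PRECONDITION & SPEC =====
-- Pre_ excludes inputs containing a string outside the lookup dict, on which Python A raises KeyError.
def Pre_auto_score (x : List String) : Prop :=
  ∀ s ∈ x, s = ")" ∨ s = "]" ∨ s = "}" ∨ s = ">"
instance (x : List String) : Decidable (Pre_auto_score x) := by unfold Pre_auto_score; infer_instance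

def pvWitness_auto_score : List String := [")", "]", "}", ">", ")"]

def Spec_auto_score (x : List String) (out : Int) : Prop := out = auto_score_alt x
instance (x : List String) (out : Int) : Decidable (Spec_auto_score x out) := by unfold Spec_auto_score; infer_instance

-- ===== CLAIM (what is proved, stated in full; the proofs are below) =====
def Claim_equal_auto_score : Prop := ∀ (x : List String), Dom_auto_score x → Pre_auto_score x → Spec_auto_score x (auto_score x)

-- ===== LEMMAS AND PROOFS =====

-- Horner accumulator lemma for A's loop.
theorem pv_horner_acc (vs : List Int) (a : Int) :
    vs.foldl (fun score ii => score * 5 + ii) a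
      = a * 5 ^ vs.length + vs.foldl (fun score ii => score * 5 + ii) 0 := by
  induction vs generalizing a with
  | nil => simp
  | cons v vs ih =>
    simp only [List.foldl_cons, List.length_cons]
    rw [ih (a * 5 + v), ih (0 * 5 + v)]
    ring

-- Under Pre_, every lookup succeeds, so A's comprehension returns some value list.
theorem pv_mapM_some (x : List String) (h : Pre_auto_score x) :
    ∃ vs, x.mapM pvLookupA = some vs := by
  induction x with
  | nil => exact ⟨[], rfl⟩
  | cons a l ih =>
    obtain ⟨ws, hw⟩ := ih (fun s hs => h s (List.mem_cons_of_mem a hs))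
    rcases h a List.mem_cons_self with h1 | h1 | h1 | h1 <;>
      subst h1 <;> exact ⟨_, by rw [List.mapM_cons, hw]; rfl⟩

-- B's reverse fold, run on the values A's comprehension produces, computes
-- (t + p * Horner(vs), p * 5 ^ |vs|) from the start state (t, p).
theorem pv_rev_fold (x : List String) (vs : List Int) (t p : Int)
    (h : x.mapM pvLookupA = some vs) :
    x.reverse.foldl pvStepB (some (t, p))
      = some (t + p * vs.foldl (fun score ii => score * 5 + ii) 0, p * 5 ^ vs.length) := by
  induction x generalizing vs t p with
  | nil =>
    simp at h; subst h; simp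
  | cons a l ih =>
    rw [List.mapM_cons] at h
    cases hf : pvLookupA a with
    | none => rw [hf] at h; simp at h
    | some v =>
      rw [hf] at h
      cases hm : List.mapM pvLookupA l with
      | none => rw [hm] at h; simp at h
      | some ws =>
        rw [hm] at h
        simp at h
        subst h
        rw [List.reverse_cons, List.foldl_append, ih ws t p hm]
        have hb : pvLookupB a = some v := hf
        simp only [List.foldl_cons, List.foldl_nil, pvStepB, hb]
        rw [pv_horner_acc ws (0 * 5 + v)]
        simp only [List.length_cons]
        ring_nf

-- ===== VERDICT (by name: the statement is the Claim_ definition above) =====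
theorem auto_score_spec : Claim_equal_auto_score := by
  intro x _ hpre
  unfold Spec_auto_score auto_score auto_score_alt
  obtain ⟨vs, hm⟩ := pv_mapM_some x hpre
  rw [hm, pv_rev_fold x vs 0 1 hm]
  simp
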